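-- pv_equiv track=rewrite | github.com/Unagi-zoso/five-golds-in-a-day | prog-sangdam.py | optimize_consultation_wait_time
-- ===== SOURCE A (Python) =====
-- from heapq import heappush, heappop
-- from itertools import combinations_with_replacement
--
-- def calculate_wait_time(consult_queue, requests, consult_type):
--     total_wait_time = 0
--     for request in requests:
--         if request[2] != consult_type:
--             continue
--         consultant_available_time = heappop(consult_queue)
--         wait_time = max(0, consultant_available_time - request[0])
--         total_wait_time += wait_time
--         next_available_time = max(request[0], consultant_available_time) + request[1]
--         heappush(consult_queue, next_available_time)
--     return total_wait_time
--
-- def optimize_consultation_wait_time(k, n, requests):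
--     min_total_wait_time = 987654321
--     for allocation in combinations_with_replacement(range(k), n):
--         consult_queues = [[] for _ in range(k)]
--         for consult_type in allocation:
--             consult_queues[consult_type].append(0)
--
--         flag = False
--         for i in range(k):
--             if len(consult_queues[i]) == 0:
--                 flag = True
--                 break
--         if flag: continue
--
--         total_wait_time = 0
--         for consult_type in range(k):
--             wait_time = calculate_wait_time(consult_queues[consult_type], requests, consult_type + 1)
--             total_wait_time += wait_time
--
--         min_total_wait_time = min(min_total_wait_time, total_wait_time)
--
--     return min_total_wait_time
-- ===== SOURCE B (Python) =====
-- from heapq import heappush, heappop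
-- from functools import lru_cache
--
-- def optimize_consultation_wait_time(k, n, requests):
--     INF = 987654321
--     if k <= 0:
--         return 0 if n == 0 else INF
--     if n < k:
--         return INF
--
--     @lru_cache(maxsize=None)
--     def cost(t, c):
--         # total wait time of the type-t requests served by c consultants
--         q = [0] * c
--         total = 0
--         for arr, dur in [(r[0], r[1]) for r in requests if r[2] == t]:
--             avail = heappop(q)
--             total += max(0, avail - arr)
--             heappush(q, max(arr, avail) + dur)
--         return total
--
--     @lru_cache(maxsize=None)
--     def best(t, j):
--         # minimal total wait assigning exactly j consultants to types 1..t, each type getting >= 1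
--         if t == 0:
--             return 0 if j == 0 else None
--         res = None
--         for c in range(1, j + 1):
--             sub = best(t - 1, j - c)
--             if sub is None:
--                 continue
--             v = cost(t, c) + sub
--             if res is None or v < res:
--                 res = v
--         return res
--
--     return min(INF, best(k, n))
-- ===== Notes on version B (the rewrite author's own statement) =====
-- stated objective: faster
-- what changed: A enumerates every multiset allocation of n consultants to k types (combinations_with_replacement) and re-simulates all queues for each; B precomputes the per-type wait cost(t,c) once per count and picks the counts (each >=1, summing to n) with a memoized DP over the types.
import Mathlib
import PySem

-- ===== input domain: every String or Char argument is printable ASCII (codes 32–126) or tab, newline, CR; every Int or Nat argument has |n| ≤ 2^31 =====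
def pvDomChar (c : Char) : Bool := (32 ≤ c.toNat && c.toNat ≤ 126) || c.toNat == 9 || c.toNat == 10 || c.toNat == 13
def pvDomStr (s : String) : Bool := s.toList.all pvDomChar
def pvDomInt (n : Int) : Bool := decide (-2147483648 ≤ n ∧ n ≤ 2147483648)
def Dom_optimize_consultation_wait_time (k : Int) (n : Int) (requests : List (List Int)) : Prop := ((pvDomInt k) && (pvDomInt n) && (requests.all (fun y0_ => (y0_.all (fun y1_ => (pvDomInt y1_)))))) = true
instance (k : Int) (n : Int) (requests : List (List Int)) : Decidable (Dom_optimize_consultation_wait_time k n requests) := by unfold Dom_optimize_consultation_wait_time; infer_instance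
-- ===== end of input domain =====

-- B replaces A's exponential enumeration of consultant allocations by a per-type cost table
-- plus a DP over counts (objective: faster, asymptotic).  Python's heapq is modelled by a
-- sorted list (value-faithful: heappop returns the minimum element).


-- ===== PORT A =====
-- model of Python's heap: a list kept sorted ascending, heappush = ordered insert, heappop = head
def pvHeapPush (x : Int) : List Int → List Int
  | [] => [x]
  | y :: ys => if x ≤ y then x :: y :: ys else y :: pvHeapPush x ys

-- literal port of calculate_wait_time (state = (consult_queue, total_wait_time));
-- heappop of an empty queue cannot happen on inputs admitted by Pre_ (getD 0 is the totalizer)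
def calculate_wait_time (q0 : List Int) (requests : List (List Int)) (ct : Int) : Int :=
  (requests.foldl (fun (st : List Int × Int) r =>
      if (PySem.List.pyGet? r 2).getD 0 ≠ ct then st
      else
        let avail := st.1.headD 0
        let q' := st.1.tail
        let arr := (PySem.List.pyGet? r 0).getD 0
        let dur := (PySem.List.pyGet? r 1).getD 0
        (pvHeapPush (max arr avail + dur) q', st.2 + max 0 (avail - arr)))
    (q0, 0)).2

-- itertools.combinations_with_replacement(pool, n): all nondecreasing n-tuples, lexicographic
def pvCwr : List Nat → Nat → List (List Nat)
  | _, 0 => [[]]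
  | [], _ + 1 => []
  | x :: xs, n + 1 => (pvCwr (x :: xs) n).map (fun a => x :: a) ++ pvCwr xs (n + 1)
  termination_by pool n => (n, pool.length)

-- consult_queues = [[] for _ in range(k)]; for t in allocation: consult_queues[t].append(0)
def pvBuildQueues (k : Nat) (alloc : List Nat) : List (List Int) :=
  alloc.foldl (fun qs t => qs.set t (qs.getD t [] ++ [(0 : Int)])) (List.replicate k ([] : List Int))

def optimize_consultation_wait_time (k : Int) (n : Int) (requests : List (List Int)) : Int :=
  (pvCwr (List.range k.toNat) n.toNat).foldl (fun best alloc =>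
      let qs := pvBuildQueues k.toNat alloc
      if (List.range k.toNat).any (fun i => (qs.getD i []).length == 0) then best
      else
        min best ((List.range k.toNat).foldl
          (fun acc t => acc + calculate_wait_time (qs.getD t []) requests ((t : Int) + 1)) 0))
    987654321

-- ===== PORT B =====
-- cost(t, c) of Source B: wait time of the type-t requests served by c consultants
def pvAltCost (requests : List (List Int)) (t : Nat) (c : Nat) : Int :=
  (((requests.filter (fun r => (PySem.List.pyGet? r 2).getD 0 == (t : Int))).map
      (fun r => ((PySem.List.pyGet? r 0).getD 0, (PySem.List.pyGet? r 1).getD 0))).foldl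
    (fun (st : List Int × Int) p =>
      let avail := st.1.headD 0
      let q' := st.1.tail
      (pvHeapPush (max p.1 avail + p.2) q', st.2 + max 0 (avail - p.1)))
    (List.replicate c (0 : Int), 0)).2

-- best(t, j) of Source B: minimal total wait giving exactly j consultants to types 1..t, each >= 1
def pvBest (cost : Nat → Nat → Int) : Nat → Nat → Option Int
  | 0, j => if j = 0 then some (0 : Int) else none
  | t + 1, j =>
    (List.range' 1 j).foldl (fun res c =>
        match pvBest cost t (j - c) with
        | none => res
        | some sub =>
          let v := cost (t + 1) c + sub
          match res with
          | none => some v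
          | some rv => some (min rv v)) none

def optimize_consultation_wait_time_alt (k : Int) (n : Int) (requests : List (List Int)) : Int :=
  if k ≤ 0 then (if n = 0 then 0 else 987654321)
  else if n < k then 987654321
  else min 987654321 ((pvBest (pvAltCost requests) k.toNat n.toNat).getD 987654321)

-- ===== PRECONDITION & SPEC =====
-- Pre_ excludes exactly the inputs where Python A raises: n < 0 (ValueError from
-- combinations_with_replacement) and, when a feasible allocation exists (1 ≤ k ≤ n),
-- a request with fewer than 3 fields (IndexError in calculate_wait_time).
def Pre_optimize_consultation_wait_time (k : Int) (n : Int) (requests : List (List Int)) : Prop :=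
  0 ≤ n ∧ ((1 ≤ k ∧ k ≤ n) → ∀ r ∈ requests, 3 ≤ (r.length : Int))
instance (k : Int) (n : Int) (requests : List (List Int)) : Decidable (Pre_optimize_consultation_wait_time k n requests) := by unfold Pre_optimize_consultation_wait_time; infer_instance

def pvWitness_optimize_consultation_wait_time : Int × Int × List (List Int) :=
  (2, 3, [[0, 5, 1], [1, 2, 2], [3, 4, 1]])

def Spec_optimize_consultation_wait_time (k : Int) (n : Int) (requests : List (List Int)) (out : Int) : Prop := out = optimize_consultation_wait_time_alt k n requests
instance (k : Int) (n : Int) (requests : List (List Int)) (out : Int) : Decidable (Spec_optimize_consultation_wait_time k n requests out) := by unfold Spec_optimize_consultation_wait_time; infer_instance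

-- ===== CLAIM (what is proved, stated in full; the proofs are below) =====
def Claim_equal_optimize_consultation_wait_time : Prop := ∀ (k : Int) (n : Int) (requests : List (List Int)), Dom_optimize_consultation_wait_time k n requests → Pre_optimize_consultation_wait_time k n requests → Spec_optimize_consultation_wait_time k n requests (optimize_consultation_wait_time k n requests)

-- ===== LEMMAS AND PROOFS =====

-- option-valued minimum machinery
def pvSMin (r : Option Int) (v : Int) : Option Int :=
  some (match r with | none => v | some x => min x v)

def pvListMin (l : List Int) : Option Int := l.foldl pvSMin none

def pvOptMin : Option Int → Option Int → Option Int
  | none, b => b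
  | some x, none => some x
  | some x, some y => some (min x y)

theorem pvSMin_rcomm (r : Option Int) (a b : Int) : pvSMin (pvSMin r a) b = pvSMin (pvSMin r b) a := by
  cases r <;> simp [pvSMin, min_comm a b, min_right_comm]

theorem pvOptMin_sMin (r : Option Int) (a : Int) (m : Option Int) :
    pvOptMin (pvSMin r a) m = pvOptMin r (pvOptMin (some a) m) := by
  cases r <;> cases m <;> simp [pvSMin, pvOptMin, min_assoc]

theorem pvFoldl_sMin (l : List Int) : ∀ r, l.foldl pvSMin r = pvOptMin r (pvListMin l) := by
  induction l with
  | nil => intro r; cases r <;> rfl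
  | cons a l ih =>
    intro r
    have h1 : pvListMin (a :: l) = pvOptMin (some a) (pvListMin l) := by
      show List.foldl pvSMin (pvSMin none a) l = _
      rw [ih]; rfl
    show List.foldl pvSMin (pvSMin r a) l = _
    rw [ih, h1, pvOptMin_sMin]

theorem pvListMin_perm {l l' : List Int} (h : l.Perm l') : pvListMin l = pvListMin l' :=
  @List.Perm.foldl_eq _ _ pvSMin _ _ ⟨pvSMin_rcomm⟩ h none

theorem pvFoldl_sMin_some (l : List Int) : ∀ a, l.foldl pvSMin (some a) = some (l.foldl min a) := by
  induction l with
  | nil => intro a; rfl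
  | cons x l ih => intro a; exact ih (min a x)

theorem pvFoldl_min (l : List Int) (a : Int) :
    l.foldl min a = match pvListMin l with | none => a | some m => min a m := by
  have h := pvFoldl_sMin l (some a)
  rw [pvFoldl_sMin_some] at h
  cases hm : pvListMin l <;> rw [hm] at h <;> simp [pvOptMin] at h <;> simp_all

theorem pvListMin_map_add (f : Int → Int) (hf : ∀ x y, f (min x y) = min (f x) (f y))
    (l : List Int) : pvListMin (l.map f) = Option.map f (pvListMin l) := by
  suffices h : ∀ r, (l.map f).foldl pvSMin (Option.map f r) = Option.map f (l.foldl pvSMin r) by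
    exact h none
  induction l with
  | nil => intro r; rfl
  | cons a l ih =>
    intro r
    show (l.map f).foldl pvSMin (pvSMin (Option.map f r) (f a)) = _
    have : pvSMin (Option.map f r) (f a) = Option.map f (pvSMin r a) := by
      cases r <;> simp [pvSMin, hf]
    rw [this, ih]
    rfl

-- a foldl that skips elements failing !p equals a min-foldl over the filtered, mapped list
theorem pvFoldl_skip {α : Type} (p : α → Bool) (f : α → Int) (l : List α) (a : Int) :
    l.foldl (fun b x => if p x then b else min b (f x)) a
      = ((l.filter (fun x => !p x)).map f).foldl min a := by
  rw [List.foldl_map, List.foldl_filter]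
  have : (fun (b : Int) (x : α) => if p x then b else min b (f x))
       = (fun (b : Int) (x : α) => if (!p x) = true then min b (f x) else b) := by
    funext b x; cases hp : p x <;> simp_all
  rw [this]

-- count vectors and composition lists
def pvCounts (pool : List Nat) (a : List Nat) : List Nat := pool.map (fun v => a.count v)

def pvCompsAll : Nat → Nat → List (List Nat)
  | 0, 0 => [[]]
  | 0, _ + 1 => []
  | k + 1, n => (List.range (n + 1)).flatMap (fun c => (pvCompsAll k (n - c)).map (fun v => c :: v))

def pvCompsPos : Nat → Nat → List (List Nat)
  | 0, 0 => [[]]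
  | 0, _ + 1 => []
  | k + 1, n => (List.range' 1 n).flatMap (fun c => (pvCompsPos k (n - c)).map (fun v => c :: v))

theorem pvCwr_zero (pool : List Nat) : pvCwr pool 0 = [[]] := by
  cases pool <;> simp [pvCwr]

theorem pvCwr_nil_succ (n : Nat) : pvCwr [] (n + 1) = [] := by simp [pvCwr]

theorem pvCwr_cons_succ (x : Nat) (xs : List Nat) (n : Nat) :
    pvCwr (x :: xs) (n + 1) = (pvCwr (x :: xs) n).map (fun a => x :: a) ++ pvCwr xs (n + 1) := by
  simp [pvCwr]

theorem pvCwr_subset : ∀ (pool : List Nat) (n : Nat), ∀ a ∈ pvCwr pool n, ∀ x ∈ a, x ∈ pool := by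
  intro pool n
  induction pool, n using pvCwr.induct with
  | case1 pool => simp [pvCwr_zero]
  | case2 n => simp [pvCwr_nil_succ]
  | case3 x xs n ih1 ih2 =>
    intro a ha y hy
    rw [pvCwr_cons_succ] at ha
    rcases List.mem_append.1 ha with h | h
    · obtain ⟨b, hb, rfl⟩ := List.mem_map.1 h
      rcases List.mem_cons.1 hy with rfl | hy'
      · exact List.mem_cons_self
      · exact ih1 b hb y hy'
    · exact List.mem_cons_of_mem x (ih2 a h y hy)

theorem pvCwr_decomp (x : Nat) (xs : List Nat) :
    ∀ n, (pvCwr (x :: xs) n).Perm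
      ((List.range (n + 1)).flatMap (fun c => (pvCwr xs (n - c)).map (fun a => List.replicate c x ++ a))) := by
  intro n
  induction n with
  | zero => simp [pvCwr_zero]
  | succ n ih =>
    rw [pvCwr_cons_succ]
    have h1 : ((pvCwr (x :: xs) n).map (fun a => x :: a)).Perm
        ((List.range (n + 1)).flatMap
          (fun c => (pvCwr xs (n - c)).map (fun a => List.replicate (c + 1) x ++ a))) := by
      refine ((ih.map (fun a => x :: a)).trans ?_).trans (List.Perm.refl _)
      rw [List.map_flatMap]
      apply List.Perm.of_eq
      apply List.flatMap_congr
      intro c _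
      rw [List.map_map]
      apply List.map_congr_left
      intro a _
      simp [List.replicate_succ]
    have h2 : (List.range (n + 2)).flatMap
          (fun c => (pvCwr xs (n + 1 - c)).map (fun a => List.replicate c x ++ a))
        = pvCwr xs (n + 1) ++ (List.range (n + 1)).flatMap
            (fun c => (pvCwr xs (n - c)).map (fun a => List.replicate (c + 1) x ++ a)) := by
      rw [List.range_succ_eq_map, List.flatMap_cons]
      congr 1
      · simp
      · rw [List.flatMap_map]
        apply List.flatMap_congr
        intro c _
        simp [Nat.succ_sub_succ]
    rw [h2]
    exact (List.Perm.append h1 (List.Perm.refl _)).trans List.perm_append_comm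

theorem pvCounts_cons (x : Nat) (xs : List Nat) (c : Nat) (a : List Nat)
    (hx : x ∉ xs) (ha : x ∉ a) :
    pvCounts (x :: xs) (List.replicate c x ++ a) = c :: pvCounts xs a := by
  unfold pvCounts
  rw [List.map_cons]
  congr 1
  · rw [List.count_append, List.count_replicate, List.count_eq_zero.2 ha]; simp
  · apply List.map_congr_left
    intro v hv
    rw [List.count_append, List.count_replicate]
    have hvx : ¬ (x = v) := fun h => hx (h ▸ hv)
    simp [hvx]

theorem pvPerm_flatMap_right {α β : Type} (l : List α) (f g : α → List β)
    (h : ∀ a ∈ l, (f a).Perm (g a)) : (l.flatMap f).Perm (l.flatMap g) := by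
  induction l with
  | nil => simp
  | cons a l ih =>
    rw [List.flatMap_cons, List.flatMap_cons]
    exact (h a List.mem_cons_self).append (ih (fun b hb => h b (List.mem_cons_of_mem a hb)))

theorem pvCounts_perm : ∀ (pool : List Nat), pool.Nodup →
    ∀ n, ((pvCwr pool n).map (pvCounts pool)).Perm (pvCompsAll pool.length n) := by
  intro pool
  induction pool with
  | nil =>
    intro _ n
    cases n with
    | zero => simp [pvCwr_zero, pvCompsAll, pvCounts]
    | succ m => simp [pvCwr_nil_succ, pvCompsAll]
  | cons x xs ih =>
    intro hnd n
    have hx : x ∉ xs := (List.nodup_cons.1 hnd).1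
    have hxs : xs.Nodup := (List.nodup_cons.1 hnd).2
    have h1 : ((pvCwr (x :: xs) n).map (pvCounts (x :: xs))).Perm
        (((List.range (n + 1)).flatMap
          (fun c => (pvCwr xs (n - c)).map (fun a => List.replicate c x ++ a))).map
            (pvCounts (x :: xs))) := (pvCwr_decomp x xs n).map _
    have h2 : (((List.range (n + 1)).flatMap
          (fun c => (pvCwr xs (n - c)).map (fun a => List.replicate c x ++ a))).map
            (pvCounts (x :: xs)))
        = (List.range (n + 1)).flatMap
          (fun c => ((pvCwr xs (n - c)).map (pvCounts xs)).map (fun v => c :: v)) := by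
      rw [List.map_flatMap]
      apply List.flatMap_congr
      intro c _
      rw [List.map_map, List.map_map]
      apply List.map_congr_left
      intro a haMem
      have hxa : x ∉ a := fun hmem => hx (pvCwr_subset xs (n - c) a haMem x hmem)
      exact pvCounts_cons x xs c a hx hxa
    have h3 : ((List.range (n + 1)).flatMap
          (fun c => ((pvCwr xs (n - c)).map (pvCounts xs)).map (fun v => c :: v))).Perm
        ((List.range (n + 1)).flatMap
          (fun c => (pvCompsAll xs.length (n - c)).map (fun v => c :: v))) := by
      apply pvPerm_flatMap_right
      intro c _
      exact (ih hxs (n - c)).map _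
    have h4 : (List.range (n + 1)).flatMap
          (fun c => (pvCompsAll xs.length (n - c)).map (fun v => c :: v))
        = pvCompsAll (x :: xs).length n := by simp [pvCompsAll]
    exact ((h1.trans (List.Perm.of_eq h2)).trans h3).trans (List.Perm.of_eq h4)

theorem pvMem_compsPos : ∀ (k n : Nat) (v : List Nat),
    v ∈ pvCompsPos k n ↔ v.length = k ∧ v.sum = n ∧ ∀ x ∈ v, 1 ≤ x := by
  intro k
  induction k with
  | zero =>
    intro n v
    cases n with
    | zero =>
      simp only [pvCompsPos, List.mem_singleton]
      constructor
      · rintro rfl; simp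
      · rintro ⟨h1, _⟩; exact List.eq_nil_of_length_eq_zero h1
    | succ m =>
      simp only [pvCompsPos, List.not_mem_nil, false_iff]
      rintro ⟨h1, h2, _⟩
      rw [List.eq_nil_of_length_eq_zero h1] at h2
      simp at h2
  | succ k ih =>
    intro n v
    simp only [pvCompsPos, List.mem_flatMap, List.mem_range'_1, List.mem_map]
    constructor
    · rintro ⟨c, hc, w, hw, rfl⟩
      obtain ⟨hl, hs, hp⟩ := (ih (n - c) w).1 hw
      refine ⟨by simp [hl], ?_, ?_⟩
      · simp only [List.sum_cons, hs]; omega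
      · intro x hx
        rcases List.mem_cons.1 hx with rfl | hx'
        · omega
        · exact hp x hx'
    · rintro ⟨hl, hs, hp⟩
      cases v with
      | nil => simp at hl
      | cons c w =>
        have hc1 : 1 ≤ c := hp c List.mem_cons_self
        have hcs : c + w.sum = n := by simpa using hs
        refine ⟨c, ⟨hc1, by omega⟩, w,
          (ih (n - c) w).2 ⟨by simpa using hl, by omega,
            fun x hx => hp x (List.mem_cons_of_mem c hx)⟩, rfl⟩

theorem pvFilter_compsAll : ∀ (k n : Nat),
    (pvCompsAll k n).filter (fun v => v.all (fun c => decide (1 ≤ c))) = pvCompsPos k n := by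
  intro k
  induction k with
  | zero =>
    intro n
    cases n with
    | zero => rfl
    | succ m => rfl
  | succ k ih =>
    intro n
    show List.filter _ ((List.range (n + 1)).flatMap _) = _
    rw [List.filter_flatMap]
    have hr : List.range (n + 1) = 0 :: List.range' 1 n := by
      rw [List.range_eq_range', List.range'_succ]
    rw [hr, List.flatMap_cons]
    have h0 : List.filter (fun v => v.all (fun c => decide (1 ≤ c)))
        ((pvCompsAll k (n - 0)).map (fun v => 0 :: v)) = [] := by
      rw [List.filter_map]
      have : List.filter ((fun v => v.all (fun c => decide (1 ≤ c))) ∘ (fun v => (0 : Nat) :: v))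
          (pvCompsAll k (n - 0)) = [] := by
        apply List.filter_eq_nil_iff.2
        intro w _
        simp
      rw [this]; rfl
    rw [h0, List.nil_append]
    show List.flatMap _ _ = List.flatMap _ _
    apply List.flatMap_congr
    intro c hc
    have hc1 : 1 ≤ c := (List.mem_range'_1.1 hc).1
    rw [List.filter_map]
    congr 1
    rw [← ih (n - c)]
    apply List.filter_congr
    intro w _
    simp [hc1]

theorem pvNodup_compsPos : ∀ (k n : Nat), (pvCompsPos k n).Nodup := by
  intro k
  induction k with
  | zero => intro n; cases n with
    | zero => simp [pvCompsPos]
    | succ m => simp [pvCompsPos]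
  | succ k ih =>
    intro n
    show (List.flatMap _ _).Nodup
    rw [List.nodup_flatMap]
    constructor
    · intro c _
      exact (ih (n - c)).map (fun v w h => by injection h)
    · have hnd : (List.range' 1 n).Nodup := List.nodup_range'
      refine hnd.imp (fun {c c'} (hne : c ≠ c') => ?_)
      intro v hv hv'
      obtain ⟨w, _, rfl⟩ := List.mem_map.1 hv
      obtain ⟨w', _, h⟩ := List.mem_map.1 hv'
      injection h with h1 _
      exact hne h1.symm

theorem pvReverse_perm_compsPos (k n : Nat) :
    ((pvCompsPos k n).map List.reverse).Perm (pvCompsPos k n) := by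
  have hnd := pvNodup_compsPos k n
  refine (List.perm_ext_iff_of_nodup
    (hnd.map (fun v w h => by simpa using congrArg List.reverse h)) hnd).2 ?_
  intro v
  constructor
  · intro hv
    obtain ⟨w, hw, rfl⟩ := List.mem_map.1 hv
    obtain ⟨hl, hs, hp⟩ := (pvMem_compsPos k n w).1 hw
    exact (pvMem_compsPos k n _).2 ⟨by simpa using hl, by simpa using hs,
      fun x hx => hp x (List.mem_reverse.1 hx)⟩
  · intro hv
    obtain ⟨hl, hs, hp⟩ := (pvMem_compsPos k n v).1 hv
    refine List.mem_map.2 ⟨v.reverse, (pvMem_compsPos k n _).2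
      ⟨by simpa using hl, by simpa using hs, fun x hx => hp x (List.mem_reverse.1 hx)⟩, by simp⟩

-- value of a composition read with descending type indices (Source B's best recursion)
def pvValD (cost : Nat → Nat → Int) : Nat → List Nat → Int
  | _, [] => 0
  | t, c :: r => cost t c + pvValD cost (t - 1) r

theorem pvListMin_flatMap {α : Type} (l : List α) (g : α → List Int) :
    pvListMin (l.flatMap g) = l.foldl (fun r c => pvOptMin r (pvListMin (g c))) none := by
  suffices h : ∀ r, (l.flatMap g).foldl pvSMin r = l.foldl (fun r' c => pvOptMin r' (pvListMin (g c))) r by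
    exact h none
  induction l with
  | nil => intro r; rfl
  | cons a l ih =>
    intro r
    rw [List.flatMap_cons, List.foldl_append, ih, pvFoldl_sMin]
    rfl

theorem pvBest_step (cost : Nat → Nat → Int) (t : Nat) (j : Nat) (res : Option Int) (c : Nat) :
    (match pvBest cost t (j - c) with
      | none => res
      | some sub =>
        let v := cost (t + 1) c + sub
        match res with
        | none => some v
        | some rv => some (min rv v))
    = pvOptMin res (Option.map (fun s => cost (t + 1) c + s) (pvBest cost t (j - c))) := by
  cases pvBest cost t (j - c) <;> cases res <;> rfl

theorem pvBest_eq (cost : Nat → Nat → Int) :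
    ∀ (t j : Nat), pvBest cost t j = pvListMin ((pvCompsPos t j).map (pvValD cost t)) := by
  intro t
  induction t with
  | zero =>
    intro j
    cases j with
    | zero => rfl
    | succ m => rfl
  | succ t ih =>
    intro j
    show (List.range' 1 j).foldl _ none = _
    have hrhs : ((pvCompsPos (t + 1) j).map (pvValD cost (t + 1)))
        = (List.range' 1 j).flatMap
            (fun c => ((pvCompsPos t (j - c)).map (pvValD cost t)).map
              (fun s => cost (t + 1) c + s)) := by
      show ((List.range' 1 j).flatMap _).map _ = _
      rw [List.map_flatMap]
      apply List.flatMap_congr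
      intro c _
      rw [List.map_map, List.map_map]
      rfl
    rw [hrhs, pvListMin_flatMap]
    have hfun : (fun (res : Option Int) (c : Nat) =>
        match pvBest cost t (j - c) with
        | none => res
        | some sub =>
          let v := cost (t + 1) c + sub
          match res with
          | none => some v
          | some rv => some (min rv v))
      = (fun (res : Option Int) (c : Nat) => pvOptMin res
          (pvListMin (((pvCompsPos t (j - c)).map (pvValD cost t)).map
            (fun s => cost (t + 1) c + s)))) := by
      funext res c
      rw [pvBest_step cost t j res c, ih (j - c),
        ← pvListMin_map_add (fun s => cost (t + 1) c + s) (fun x y => by simp only []; omega)]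
    rw [hfun]

theorem pvBuildQueues_fold_getD :
    ∀ (alloc : List Nat) (qs : List (List Int)) (t : Nat), t < qs.length →
      (∀ x ∈ alloc, x < qs.length) →
      (alloc.foldl (fun qs t => qs.set t (qs.getD t [] ++ [(0 : Int)])) qs).getD t []
        = qs.getD t [] ++ List.replicate (alloc.count t) 0 := by
  intro alloc
  induction alloc with
  | nil => intro qs t ht _; simp
  | cons a alloc ih =>
    intro qs t ht hsub
    have ha : a < qs.length := hsub a List.mem_cons_self
    rw [List.foldl_cons]
    rw [ih _ t (by simpa using ht) (fun x hx => by simpa using hsub x (List.mem_cons_of_mem a hx))]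
    rw [List.getD_eq_getElem?_getD, List.getD_eq_getElem?_getD, List.getElem?_set]
    by_cases hat : a = t
    · subst hat
      rw [if_pos rfl, if_pos ha]
      rw [List.count_cons]
      simp only [beq_self_eq_true, if_true, List.replicate_add]
      show (qs.getD a [] ++ [0]) ++ List.replicate (alloc.count a) 0
          = qs.getD a [] ++ (List.replicate (alloc.count a) 0 ++ List.replicate 1 0)
      rw [List.append_assoc]
      congr 1
      rw [← List.replicate_add, List.singleton_append, ← List.replicate_succ]
    · rw [if_neg hat, List.count_cons]
      have : (a == t) = false := by simpa using hat
      simp [this]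

theorem pvBuildQueues_getD (k : Nat) (alloc : List Nat) (t : Nat) (ht : t < k)
    (hsub : ∀ x ∈ alloc, x < k) :
    (pvBuildQueues k alloc).getD t [] = List.replicate (alloc.count t) 0 := by
  unfold pvBuildQueues
  rw [pvBuildQueues_fold_getD alloc _ t (by simpa using ht) (fun x hx => by simpa using hsub x hx)]
  rw [List.getD_eq_getElem?_getD]
  simp [ht]

theorem pvCalc_cost (requests : List (List Int)) (t : Nat) (c : Nat) :
    calculate_wait_time (List.replicate c 0) requests ((t : Int) + 1) = pvAltCost requests (t + 1) c := by
  unfold calculate_wait_time pvAltCost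
  rw [List.foldl_map, List.foldl_filter]
  have : (fun (st : List Int × Int) (r : List Int) =>
        if (PySem.List.pyGet? r 2).getD 0 ≠ (t : Int) + 1 then st
        else
          let avail := st.1.headD 0
          let q' := st.1.tail
          let arr := (PySem.List.pyGet? r 0).getD 0
          let dur := (PySem.List.pyGet? r 1).getD 0
          (pvHeapPush (max arr avail + dur) q', st.2 + max 0 (avail - arr)))
      = (fun (st : List Int × Int) (r : List Int) =>
          if ((PySem.List.pyGet? r 2).getD 0 == ((t + 1 : Nat) : Int)) = true then
            ((fun (st : List Int × Int) (p : Int × Int) =>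
              let avail := st.1.headD 0
              let q' := st.1.tail
              (pvHeapPush (max p.1 avail + p.2) q', st.2 + max 0 (avail - p.1))) st
              ((PySem.List.pyGet? r 0).getD 0, (PySem.List.pyGet? r 1).getD 0))
          else st) := by
    funext st r
    have hcast : ((t + 1 : Nat) : Int) = (t : Int) + 1 := by push_cast; ring
    by_cases h : (PySem.List.pyGet? r 2).getD 0 = (t : Int) + 1
    · simp [h, hcast]
    · simp [h, hcast]
  rw [this]

-- A's inner total as a function of the count vector
def pvFA (cost : Nat → Nat → Int) (k : Nat) (v : List Nat) : Int :=
  (List.range k).foldl (fun acc t => acc + cost (t + 1) (v.getD t 0)) 0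

theorem pvFA_append (cost : Nat → Nat → Int) (w : List Nat) (c : Nat) :
    pvFA cost (w.length + 1) (w ++ [c]) = pvFA cost w.length w + cost (w.length + 1) c := by
  unfold pvFA
  rw [List.range_succ, List.foldl_append]
  have h1 : (List.range w.length).foldl
       (fun acc t => acc + cost (t + 1) ((w ++ [c]).getD t 0)) 0
      = (List.range w.length).foldl (fun acc t => acc + cost (t + 1) (w.getD t 0)) 0 := by
    apply PySem.List.foldl_congr_mem
    intro acc t htm
    have ht : t < w.length := List.mem_range.1 htm
    rw [List.getD_eq_getElem?_getD, List.getD_eq_getElem?_getD,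
      List.getElem?_append_left ht]
  rw [h1]
  simp [List.getD_eq_getElem?_getD]

theorem pvFA_valD (cost : Nat → Nat → Int) :
    ∀ (v : List Nat) (k : Nat), v.length = k → pvFA cost k v = pvValD cost k v.reverse := by
  intro v
  induction v using List.reverseRecOn with
  | nil => rintro k rfl; rfl
  | append_singleton w c ih =>
    rintro k rfl
    rw [List.length_append]
    simp only [List.length_singleton]
    rw [pvFA_append, List.reverse_append]
    simp only [List.reverse_singleton, List.singleton_append]
    show _ = cost (w.length + 1) c + pvValD cost (w.length + 1 - 1) w.reverse
    rw [Nat.add_sub_cancel, ← ih w.length rfl]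
    ring

-- A's loop body, named (the infeasibility test and the total of one allocation)
def pvInfeas (k : Nat) (alloc : List Nat) : Bool :=
  (List.range k).any (fun i => ((pvBuildQueues k alloc).getD i []).length == 0)

def pvTotal (requests : List (List Int)) (k : Nat) (alloc : List Nat) : Int :=
  (List.range k).foldl
    (fun acc t => acc + calculate_wait_time ((pvBuildQueues k alloc).getD t []) requests ((t : Int) + 1)) 0

theorem pvA_unfold (k n : Int) (requests : List (List Int)) :
    optimize_consultation_wait_time k n requests
      = (pvCwr (List.range k.toNat) n.toNat).foldl
          (fun best alloc => if pvInfeas k.toNat alloc then best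
            else min best (pvTotal requests k.toNat alloc)) 987654321 := rfl

theorem pvLength_le_sum : ∀ (v : List Nat), (∀ x ∈ v, 1 ≤ x) → v.length ≤ v.sum := by
  intro v
  induction v with
  | nil => intro _; simp
  | cons c w ih =>
    intro h
    have h1 : 1 ≤ c := h c List.mem_cons_self
    have h2 := ih (fun x hx => h x (List.mem_cons_of_mem c hx))
    simp only [List.length_cons, List.sum_cons]
    omega

theorem pvCompsPos_nil_of_lt (K N : Nat) (h : N < K) : pvCompsPos K N = [] := by
  apply List.eq_nil_iff_forall_not_mem.2
  intro v hv
  obtain ⟨hl, hs, hp⟩ := (pvMem_compsPos K N v).1 hv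
  have := pvLength_le_sum v hp
  omega

theorem pvInfeas_eq (K : Nat) (alloc : List Nat) (hsub : ∀ x ∈ alloc, x < K) :
    (!pvInfeas K alloc) = (pvCounts (List.range K) alloc).all (fun c => decide (1 ≤ c)) := by
  have h1 : pvInfeas K alloc = true ↔ ∃ i, i ∈ List.range K ∧ alloc.count i = 0 := by
    unfold pvInfeas
    rw [List.any_eq_true]
    constructor
    · rintro ⟨i, hi, h⟩
      rw [pvBuildQueues_getD K alloc i (List.mem_range.1 hi) hsub] at h
      exact ⟨i, hi, by simpa using h⟩
    · rintro ⟨i, hi, h⟩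
      refine ⟨i, hi, ?_⟩
      rw [pvBuildQueues_getD K alloc i (List.mem_range.1 hi) hsub]
      simpa using h
  have h2 : (pvCounts (List.range K) alloc).all (fun c => decide (1 ≤ c)) = true
      ↔ ∀ i ∈ List.range K, 1 ≤ alloc.count i := by
    unfold pvCounts
    rw [List.all_map, List.all_eq_true]
    simp
  cases hb : pvInfeas K alloc
  · simp only [Bool.not_false]
    symm
    rw [h2]
    intro i hi
    by_contra hlt
    exact (Bool.false_ne_true) (hb ▸ (h1.2 ⟨i, hi, by omega⟩))
  · simp only [Bool.not_true]
    symm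
    rw [← Bool.not_eq_true]
    rw [h2]
    obtain ⟨i, hi, hzero⟩ := h1.1 hb
    intro hall
    have := hall i hi
    omega

theorem pvTotal_eq (requests : List (List Int)) (K : Nat) (alloc : List Nat)
    (hsub : ∀ x ∈ alloc, x < K) :
    pvTotal requests K alloc = pvFA (pvAltCost requests) K (pvCounts (List.range K) alloc) := by
  unfold pvTotal pvFA
  apply PySem.List.foldl_congr_mem
  intro acc t htm
  have ht : t < K := List.mem_range.1 htm
  rw [pvBuildQueues_getD K alloc t ht hsub, pvCalc_cost]
  congr 1
  unfold pvCounts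
  rw [List.getD_eq_getElem?_getD, List.getElem?_map, List.getElem?_range ht]
  rfl

theorem pvVals_eq (K N : Nat) (requests : List (List Int)) :
    pvListMin (((pvCwr (List.range K) N).filter (fun a => !pvInfeas K a)).map (pvTotal requests K))
      = pvListMin ((pvCompsPos K N).map (pvValD (pvAltCost requests) K)) := by
  have hsub : ∀ a ∈ pvCwr (List.range K) N, ∀ x ∈ a, x < K := by
    intro a ha x hx
    exact List.mem_range.1 (pvCwr_subset (List.range K) N a ha x hx)
  -- rewrite the filter predicate and the mapped function pointwise
  have hfilter : (pvCwr (List.range K) N).filter (fun a => !pvInfeas K a)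
      = (pvCwr (List.range K) N).filter
          (fun a => (pvCounts (List.range K) a).all (fun c => decide (1 ≤ c))) := by
    apply List.filter_congr
    intro a ha
    exact pvInfeas_eq K a (hsub a ha)
  rw [hfilter]
  have hmap : ((pvCwr (List.range K) N).filter
        (fun a => (pvCounts (List.range K) a).all (fun c => decide (1 ≤ c)))).map (pvTotal requests K)
      = ((pvCwr (List.range K) N).filter
        (fun a => (pvCounts (List.range K) a).all (fun c => decide (1 ≤ c)))).map
          (fun a => pvFA (pvAltCost requests) K (pvCounts (List.range K) a)) := by
    apply List.map_congr_left
    intro a ha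
    exact pvTotal_eq requests K a (hsub a (List.mem_of_mem_filter ha))
  rw [hmap]
  -- move pvCounts out of the filter and map
  have hcomm : ((pvCwr (List.range K) N).filter
        (fun a => (pvCounts (List.range K) a).all (fun c => decide (1 ≤ c)))).map
          (fun a => pvFA (pvAltCost requests) K (pvCounts (List.range K) a))
      = (((pvCwr (List.range K) N).map (pvCounts (List.range K))).filter
          (fun v => v.all (fun c => decide (1 ≤ c)))).map (pvFA (pvAltCost requests) K) := by
    rw [List.filter_map, List.map_map]
    rfl
  rw [hcomm]
  -- permutation of count vectors to compositions
  have hperm1 : (((pvCwr (List.range K) N).map (pvCounts (List.range K))).filter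
        (fun v => v.all (fun c => decide (1 ≤ c)))).Perm (pvCompsPos K N) := by
    have h := (pvCounts_perm (List.range K) (List.nodup_range) N).filter
      (fun v => v.all (fun c => decide (1 ≤ c)))
    rw [List.length_range] at h
    rw [pvFilter_compsAll K N] at h
    exact h
  rw [pvListMin_perm (hperm1.map (pvFA (pvAltCost requests) K))]
  -- evaluate pvFA on compositions via the reversed composition
  have hFA : (pvCompsPos K N).map (pvFA (pvAltCost requests) K)
      = ((pvCompsPos K N).map List.reverse).map (pvValD (pvAltCost requests) K) := by
    rw [List.map_map]
    apply List.map_congr_left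
    intro v hv
    obtain ⟨hl, _, _⟩ := (pvMem_compsPos K N v).1 hv
    exact pvFA_valD (pvAltCost requests) v K hl
  rw [hFA]
  exact pvListMin_perm ((pvReverse_perm_compsPos K N).map (pvValD (pvAltCost requests) K))

theorem pvA_chain (k n : Int) (requests : List (List Int)) :
    optimize_consultation_wait_time k n requests
      = match pvBest (pvAltCost requests) k.toNat n.toNat with
        | none => 987654321
        | some m => min 987654321 m := by
  rw [pvA_unfold, pvFoldl_skip, pvFoldl_min, pvVals_eq, ← pvBest_eq]

-- ===== VERDICT (by name: the statement is the Claim_ definition above) =====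
theorem optimize_consultation_wait_time_spec : Claim_equal_optimize_consultation_wait_time := by
  unfold Claim_equal_optimize_consultation_wait_time
  intro k n requests _ hpre
  obtain ⟨hn, -⟩ := hpre
  unfold Spec_optimize_consultation_wait_time optimize_consultation_wait_time_alt
  rw [pvA_chain]
  by_cases hk : k ≤ 0
  · rw [if_pos hk]
    have hK : k.toNat = 0 := Int.toNat_of_nonpos hk
    by_cases hn0 : n = 0
    · rw [if_pos hn0]
      subst hn0
      rw [hK]
      rfl
    · rw [if_neg hn0]
      have : ∃ m, n.toNat = m + 1 := ⟨n.toNat - 1, by omega⟩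
      obtain ⟨m, hm⟩ := this
      rw [hK, hm]
      rfl
  · rw [if_neg hk]
    by_cases hnk : n < k
    · rw [if_pos hnk]
      have hlt : n.toNat < k.toNat := by omega
      rw [pvBest_eq, pvCompsPos_nil_of_lt _ _ hlt]
      rfl
    · rw [if_neg hnk]
      cases hb : pvBest (pvAltCost requests) k.toNat n.toNat
      · simp
      · simp
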